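-- pv_equiv track=rewrite | github.com/flobotics/func_sign_prob | ubuntu-20-04-scripts/build-tf-embedding-dataset/tokenize_att_disassembly_from_pickle.py | build_bag_of_words_style_assembly
-- ===== SOURCE A (Python) =====
-- def build_bag_of_words_style_assembly(cleaned_att_disassembly):
--     bag_style_att_disassembly = list()
--
--     for line in cleaned_att_disassembly:
--         line = line.replace('(', ' ( ')
--         line = line.replace(')', ' ) ')
--         line = line.replace('%', ' % ')
--         line = line.replace(',', ' , ')
--         line = line.replace('$', ' $ ')
--         line = line.replace('*', ' * ')
--         for item in line.split():
--             ### replace every addr e.g. 0x764 with 0x, to have a better vocab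
--             if '0x' in item:
--                 bag_style_att_disassembly.append('0x')
--             else:
--                 bag_style_att_disassembly.append(item)
--
--     return bag_style_att_disassembly
-- ===== SOURCE B (Python) =====
-- # One-pass character scanner: tokenizes each line directly (specials as single
-- # tokens, whitespace as separator) instead of building six intermediate
-- # replaced strings and splitting.
--
-- _SPECIALS = '()%,$*'
--
--
-- def _flush(tok, bag):
--     if tok:
--         word = ''.join(tok)
--         bag.append('0x' if '0x' in word else word)
--     return []
--
--
-- def build_bag_of_words_style_assembly(cleaned_att_disassembly):
--     bag = []
--     for line in cleaned_att_disassembly: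
--         tok = []
--         for ch in line:
--             if ch in _SPECIALS:
--                 tok = _flush(tok, bag)
--                 bag.append(ch)
--             elif ch.isspace():
--                 tok = _flush(tok, bag)
--             else:
--                 tok.append(ch)
--         _flush(tok, bag)
--     return bag
-- ===== Notes on version B (the rewrite author's own statement) =====
-- stated objective: alternative
-- what changed: Replaced the six chained str.replace passes plus str.split with a single left-to-right character scanner that emits special characters as tokens, flushes on whitespace, and normalizes '0x' words as it goes, never building intermediate spaced strings.
import Mathlib
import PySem

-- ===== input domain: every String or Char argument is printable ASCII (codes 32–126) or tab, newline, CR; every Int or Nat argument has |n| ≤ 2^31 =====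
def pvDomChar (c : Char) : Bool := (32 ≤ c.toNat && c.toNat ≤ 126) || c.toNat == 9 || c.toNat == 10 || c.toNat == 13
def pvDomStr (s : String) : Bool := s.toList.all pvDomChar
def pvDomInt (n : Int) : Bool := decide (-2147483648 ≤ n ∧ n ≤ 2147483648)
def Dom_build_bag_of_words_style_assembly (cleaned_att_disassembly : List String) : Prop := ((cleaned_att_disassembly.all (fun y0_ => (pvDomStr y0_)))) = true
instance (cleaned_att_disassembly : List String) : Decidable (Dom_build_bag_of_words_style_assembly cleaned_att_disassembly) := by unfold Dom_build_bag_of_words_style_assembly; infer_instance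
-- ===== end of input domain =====

-- B replaces the six chained replace-then-split passes of A by a single
-- left-to-right character scanner (alternative decomposition, same cost).

-- ===== PORT A =====
def build_bag_of_words_style_assembly (cleaned_att_disassembly : List String) : List String :=
  -- the six successive reassignments of `line` are transcribed as nested replace calls
  cleaned_att_disassembly.foldl (fun bag line =>
    (PySem.Str.split₀ (PySem.Str.replace (PySem.Str.replace (PySem.Str.replace
        (PySem.Str.replace (PySem.Str.replace (PySem.Str.replace line "(" " ( ")
          ")" " ) ") "%" " % ") "," " , ") "$" " $ ") "*" " * ")).foldl
      (fun bag item =>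
        if PySem.Str.isIn "0x" item then bag ++ ["0x"] else bag ++ [item]) bag) []

-- ===== PORT B =====
def pvSpecial (c : Char) : Bool :=
  c == '(' || c == ')' || c == '%' || c == ',' || c == '$' || c == '*'

-- Source B's `_flush`: emit the pending word (normalized to "0x") if nonempty
def pvFlush (tok : List Char) (bag : List String) : List String :=
  if tok.isEmpty then bag
  else
    let word := String.ofList tok
    if PySem.Str.isIn "0x" word then bag ++ ["0x"] else bag ++ [word]

-- Source B's inner character loop (state: pending token, output bag)
def pvScanLine : List Char → List Char → List String → List String
  | [], tok, bag => pvFlush tok bag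
  | c :: rest, tok, bag =>
    if pvSpecial c then pvScanLine rest [] (pvFlush tok bag ++ [String.ofList [c]])
    else if PySem.Chars.isspace c then pvScanLine rest [] (pvFlush tok bag)
    else pvScanLine rest (tok ++ [c]) bag

def build_bag_of_words_style_assembly_alt (cleaned_att_disassembly : List String) : List String :=
  cleaned_att_disassembly.foldl (fun bag line => pvScanLine line.toList [] bag) []

-- ===== PRECONDITION & SPEC =====
def Spec_build_bag_of_words_style_assembly (cleaned_att_disassembly : List String) (out : List String) : Prop := out = build_bag_of_words_style_assembly_alt cleaned_att_disassembly
instance (cleaned_att_disassembly : List String) (out : List String) : Decidable (Spec_build_bag_of_words_style_assembly cleaned_att_disassembly out) := by unfold Spec_build_bag_of_words_style_assembly; infer_instance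

-- ===== CLAIM (what is proved, stated in full; the proofs are below) =====
def Claim_equal_build_bag_of_words_style_assembly : Prop := ∀ (cleaned_att_disassembly : List String), Dom_build_bag_of_words_style_assembly cleaned_att_disassembly → Spec_build_bag_of_words_style_assembly cleaned_att_disassembly (build_bag_of_words_style_assembly cleaned_att_disassembly)

-- ===== LEMMAS AND PROOFS =====

-- per-character expansion performed (jointly) by A's six replaces
def pvExpand (c : Char) : List Char := if pvSpecial c then [' ', c, ' '] else [c]

-- token normalization, on the char-list level
def pvGw (w : List Char) : String :=
  if PySem.Chars.isIn ['0', 'x'] w then "0x" else String.ofList w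

-- single-char replace is a flatMap
theorem pv_go_single (c : Char) (r : List Char) :
    ∀ (l : List Char) (fuel : Nat) (acc : List Char), l.length ≤ fuel →
      PySem.Chars.replace.go [c] r fuel l acc
        = acc.reverse ++ l.flatMap (fun d => if d = c then r else [d]) := by
  intro l
  induction l with
  | nil =>
      intro fuel acc _
      cases fuel <;> simp [PySem.Chars.replace.go]
  | cons d t ih =>
      intro fuel acc hle
      cases fuel with
      | zero => simp at hle
      | succ f =>
        have hlt : t.length ≤ f := by simpa using hle
        by_cases hd : d = c
        · subst hd
          have hp : List.isPrefixOf [d] (d :: t) = true := by simp [List.isPrefixOf]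
          simp [PySem.Chars.replace.go, hp, ih f _ hlt, List.reverse_append]
        · have hpre : List.isPrefixOf [c] (d :: t) = false := by
            simp [List.isPrefixOf]
            exact fun h => (hd h.symm).elim
          simp [PySem.Chars.replace.go, hpre, hd, ih f _ hlt]

theorem pv_replace_single (l : List Char) (c : Char) (r : List Char) :
    PySem.Chars.replace l [c] r = l.flatMap (fun d => if d = c then r else [d]) := by
  simp [PySem.Chars.replace, pv_go_single c r l l.length [] (le_refl _)]

-- the six expansions chained on one character
theorem pv_chain_char (c : Char) :
    List.flatMap (fun x1 =>
      List.flatMap (fun x2 =>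
        List.flatMap (fun x3 =>
          List.flatMap (fun x4 =>
            List.flatMap (fun d => if d = '*' then [' ', '*', ' '] else [d])
              (if x4 = '$' then [' ', '$', ' '] else [x4]))
            (if x3 = ',' then [' ', ',', ' '] else [x3]))
          (if x2 = '%' then [' ', '%', ' '] else [x2]))
        (if x1 = ')' then [' ', ')', ' '] else [x1]))
      (if c = '(' then [' ', '(', ' '] else [c])
      = pvExpand c := by
  by_cases h1 : c = '(';  · subst h1; decide
  by_cases h2 : c = ')';  · subst h2; decide
  by_cases h3 : c = '%';  · subst h3; decide
  by_cases h4 : c = ',';  · subst h4; decide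
  by_cases h5 : c = '$';  · subst h5; decide
  by_cases h6 : c = '*';  · subst h6; decide
  simp [pvExpand, pvSpecial, h1, h2, h3, h4, h5, h6]

-- A's six replaces amount to flatMap pvExpand
theorem pv_replace6 (l : List Char) :
    PySem.Chars.replace (PySem.Chars.replace (PySem.Chars.replace (PySem.Chars.replace
      (PySem.Chars.replace (PySem.Chars.replace l ['('] [' ', '(', ' '])
        [')'] [' ', ')', ' ']) ['%'] [' ', '%', ' ']) [','] [' ', ',', ' '])
        ['$'] [' ', '$', ' ']) ['*'] [' ', '*', ' ']
      = l.flatMap pvExpand := by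
  simp only [pv_replace_single, List.flatMap_assoc]
  exact List.flatMap_congr (fun c _ => pv_chain_char c)

-- split₀.go: the accumulator factors out
theorem pv_split_go_acc (s : List Char) :
    ∀ cur acc, PySem.Chars.split₀.go s cur acc
      = acc.reverse ++ PySem.Chars.split₀.go s cur [] := by
  induction s with
  | nil =>
      intro cur acc
      cases h : cur.isEmpty <;> simp [PySem.Chars.split₀.go, h]
  | cons c rest ih =>
      intro cur acc
      cases hs : PySem.Chars.isspace c
      · simp only [PySem.Chars.split₀.go, hs, Bool.false_eq_true, if_false]
        exact ih (c :: cur) acc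
      · cases h : cur.isEmpty
        · simp only [PySem.Chars.split₀.go, hs, h, if_true, Bool.false_eq_true, if_false]
          rw [ih [] (cur.reverse :: acc), ih [] [cur.reverse]]
          simp
        · simp only [PySem.Chars.split₀.go, hs, h, if_true]
          exact ih [] acc

-- oriented version usable by simp (no loop: [] never matches a :: acc)
theorem pv_split_go_acc_cons (s cur : List Char) (a : List Char) (acc : List (List Char)) :
    PySem.Chars.split₀.go s cur (a :: acc)
      = (a :: acc).reverse ++ PySem.Chars.split₀.go s cur [] :=
  pv_split_go_acc s cur (a :: acc)

theorem pv_norm_ofList (w : List Char) :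
    (if PySem.Str.isIn "0x" (String.ofList w) then "0x" else String.ofList w) = pvGw w := by
  simp [PySem.Str.isIn, pvGw]

-- flush emits exactly the normalized pending token
theorem pv_flush_eq (tok : List Char) (bag : List String) :
    pvFlush tok bag = bag ++ (if tok.isEmpty then [] else [tok]).map pvGw := by
  cases h : tok.isEmpty
  · simp only [pvFlush, h, Bool.false_eq_true, if_false, List.map_cons, List.map_nil]
    rw [show (if PySem.Str.isIn "0x" (String.ofList tok) then bag ++ ["0x"] else bag ++ [String.ofList tok])
      = bag ++ [if PySem.Str.isIn "0x" (String.ofList tok) then "0x" else String.ofList tok] from by split_ifs <;> rfl]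
    rw [pv_norm_ofList]
  · simp [pvFlush, h]

-- the scanner computes the normalized whitespace-split of the expanded line
theorem pv_scan_eq (cs : List Char) :
    ∀ tok bag, pvScanLine cs tok bag
      = bag ++ (PySem.Chars.split₀.go (cs.flatMap pvExpand) tok.reverse []).map pvGw := by
  induction cs with
  | nil =>
      intro tok bag
      cases tok with
      | nil => simp [pvScanLine, pvFlush, PySem.Chars.split₀.go]
      | cons a t =>
          have h : ((a :: t).reverse.isEmpty) = false := by simp
          simp [pvScanLine, pv_flush_eq, PySem.Chars.split₀.go]
  | cons c rest ih =>
      intro tok bag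
      cases hsp : pvSpecial c
      · -- not special: expands to itself
        have hexp : (c :: rest).flatMap pvExpand = c :: rest.flatMap pvExpand := by
          simp [pvExpand, hsp]
        cases hs : PySem.Chars.isspace c
        · -- ordinary character: extend the pending token
          simp only [pvScanLine, hsp, hs, Bool.false_eq_true, if_false]
          rw [ih (tok ++ [c]) bag, hexp]
          simp [PySem.Chars.split₀.go, hs]
        · -- whitespace: flush
          simp only [pvScanLine, hsp, hs, Bool.false_eq_true, if_false, if_true]
          rw [ih [] (pvFlush tok bag), hexp]
          cases h : tok.isEmpty
          · have h' : (tok.reverse.isEmpty) = false := by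
              cases tok
              · simp at h
              · simp
            simp [PySem.Chars.split₀.go, hs, h', pv_split_go_acc_cons, pv_flush_eq, h]
          · have h' : tok = [] := by simpa using h
            subst h'
            simp [PySem.Chars.split₀.go, hs, pv_flush_eq]
      · -- special character: expands to ' ' c ' ', always emitted alone
        have hsp' := hsp
        simp only [pvSpecial, Bool.or_eq_true, beq_iff_eq] at hsp'
        have hcs : PySem.Chars.isspace c = false := by
          rcases hsp' with (((((h|h)|h)|h)|h)|h) <;> subst h <;> decide
        have hgw : pvGw [c] = String.ofList [c] := by
          rcases hsp' with (((((h|h)|h)|h)|h)|h) <;> subst h <;> decide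
        have hexp : (c :: rest).flatMap pvExpand = ' ' :: c :: ' ' :: rest.flatMap pvExpand := by
          simp [pvExpand, hsp]
        have hws : PySem.Chars.isspace ' ' = true := by decide
        simp only [pvScanLine, hsp, if_true]
        rw [ih [] (pvFlush tok bag ++ [String.ofList [c]]), hexp]
        cases h : tok.isEmpty
        · have h' : (tok.reverse.isEmpty) = false := by
            cases tok
            · simp at h
            · simp
          simp [PySem.Chars.split₀.go, hws, hcs, h', pv_split_go_acc_cons, pv_flush_eq, h, hgw]
        · have h' : tok = [] := by simpa using h
          subst h'
          simp [PySem.Chars.split₀.go, hws, hcs, pv_split_go_acc_cons, pv_flush_eq, hgw]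

-- A's inner loop appends the normalized tokens
theorem pv_inner_foldl (ws : List String) :
    ∀ bag, ws.foldl (fun bag item =>
        if PySem.Str.isIn "0x" item then bag ++ ["0x"] else bag ++ [item]) bag
      = bag ++ ws.map (fun item => if PySem.Str.isIn "0x" item then "0x" else item) := by
  induction ws with
  | nil => intro bag; simp
  | cons w t ih =>
      intro bag
      rw [List.foldl_cons, ih, List.map_cons]
      split_ifs <;> simp

-- per-line agreement of the two fold steps
theorem pv_step_eq (bag : List String) (line : String) :
    (PySem.Str.split₀ (PySem.Str.replace (PySem.Str.replace (PySem.Str.replace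
        (PySem.Str.replace (PySem.Str.replace (PySem.Str.replace line "(" " ( ")
          ")" " ) ") "%" " % ") "," " , ") "$" " $ ") "*" " * ")).foldl
      (fun bag item => if PySem.Str.isIn "0x" item then bag ++ ["0x"] else bag ++ [item]) bag
    = pvScanLine line.toList [] bag := by
  rw [pv_scan_eq line.toList [] bag, pv_inner_foldl]
  have htl : (PySem.Str.replace (PySem.Str.replace (PySem.Str.replace
      (PySem.Str.replace (PySem.Str.replace (PySem.Str.replace line "(" " ( ")
        ")" " ) ") "%" " % ") "," " , ") "$" " $ ") "*" " * ").toList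
      = line.toList.flatMap pvExpand := by
    simp only [PySem.Str.replace, String.toList_ofList]
    exact pv_replace6 line.toList
  simp only [PySem.Str.split₀, htl, PySem.Chars.split₀, List.map_map]
  exact congrArg (bag ++ ·) (List.map_congr_left (fun w _ => pv_norm_ofList w))

-- the whole fold, line by line
set_option maxHeartbeats 2000000 in
theorem pv_fold_eq (ls : List String) :
    ∀ bag, ls.foldl (fun bag line =>
        (PySem.Str.split₀ (PySem.Str.replace (PySem.Str.replace (PySem.Str.replace
            (PySem.Str.replace (PySem.Str.replace (PySem.Str.replace line "(" " ( ")
              ")" " ) ") "%" " % ") "," " , ") "$" " $ ") "*" " * ")).foldl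
          (fun bag item => if PySem.Str.isIn "0x" item then bag ++ ["0x"] else bag ++ [item]) bag) bag
      = ls.foldl (fun bag line => pvScanLine line.toList [] bag) bag := by
  induction ls with
  | nil => intro bag; simp only [List.foldl_nil]
  | cons line t ih =>
      intro bag
      rw [List.foldl_cons, List.foldl_cons, pv_step_eq bag line]
      exact ih _

-- ===== VERDICT (by name: the statement is the Claim_ definition above) =====
set_option maxHeartbeats 2000000 in
theorem build_bag_of_words_style_assembly_spec : Claim_equal_build_bag_of_words_style_assembly := by
  intro l _
  unfold Spec_build_bag_of_words_style_assembly
  unfold build_bag_of_words_style_assembly build_bag_of_words_style_assembly_alt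
  exact pv_fold_eq l []
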